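-- pv_equiv track=rewrite | github.com/yaniv-golan/eml-skill | .agents/skills/eml-optimize/_shared/eml_core/minimality.py | _syntactic_counts
-- ===== SOURCE A (Python) =====
-- def _syntactic_counts(max_k: int, binary: bool) -> dict[int, int]:
--     """Wedderburn-Etherington-like count of all K-token EML trees, computed
--     analytically from the product recurrence. Pure arithmetic; no enumeration.
--     """
--     leaves = 3 if binary else 2
--     counts: dict[int, int] = {1: leaves}
--     for K in range(3, max_k + 1, 2):
--         s = 0
--         for K_a in range(1, K, 2):
--             K_b = K - 1 - K_a
--             s += counts[K_a] * counts[K_b]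
--         counts[K] = s
--     return counts
-- ===== SOURCE B (Python) =====
-- def _syntactic_counts(max_k: int, binary: bool) -> dict[int, int]:
--     """Same counts via the Catalan ratio recurrence: counts[2m+1] =
--     Catalan(m) * leaves**(m+1), with Catalan maintained incrementally
--     (one multiply/divide per key instead of A's quadratic convolution)."""
--     leaves = 3 if binary else 2
--     counts = {1: leaves}
--     cat = 1            # Catalan(m)
--     power = leaves     # leaves ** (m + 1)
--     m = 0
--     for K in range(3, max_k + 1, 2):
--         cat = cat * (2 * (2 * m + 1)) // (m + 2)
--         power *= leaves
--         m += 1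
--         counts[K] = cat * power
--     return counts
-- ===== Notes on version B (the rewrite author's own statement) =====
-- stated objective: faster
-- what changed: Replaces A's per-key convolution over all smaller odd keys by the Catalan ratio recurrence (counts[2m+1] = Catalan(m)*leaves^(m+1), with Catalan(m) and leaves^(m+1) maintained incrementally), so each key costs one exact multiply/divide instead of a linear inner loop.
import Mathlib
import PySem

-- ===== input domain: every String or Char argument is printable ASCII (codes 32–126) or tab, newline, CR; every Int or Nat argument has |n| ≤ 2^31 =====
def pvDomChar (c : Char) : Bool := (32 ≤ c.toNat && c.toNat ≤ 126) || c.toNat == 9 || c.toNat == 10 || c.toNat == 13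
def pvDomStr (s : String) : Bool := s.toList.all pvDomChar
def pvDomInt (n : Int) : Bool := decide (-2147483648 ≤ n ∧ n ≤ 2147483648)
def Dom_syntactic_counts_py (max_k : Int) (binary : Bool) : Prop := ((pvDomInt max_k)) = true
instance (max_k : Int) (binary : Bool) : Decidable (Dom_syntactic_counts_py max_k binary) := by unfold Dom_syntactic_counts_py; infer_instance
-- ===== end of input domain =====

-- B replaces A's quadratic convolution by the Catalan ratio recurrence (one
-- multiply/divide per key): counts[2m+1] = Catalan(m) * leaves^(m+1); measurably faster.

-- ===== PORT A =====
def syntactic_counts_py (max_k : Int) (binary : Bool) : List (Int × Int) :=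
  let leaves : Int := if binary then 3 else 2
  let counts : PySem.Dict Int Int := PySem.Dict.ofList [(1, leaves)]
  let counts := (PySem.List.pyRange 3 (max_k + 1) 2).foldl
    (fun counts K =>
      -- s = Σ counts[K_a] * counts[K_b]; both keys are always present when read,
      -- so Python's counts[k] is ported as (counts.get? k).getD 0
      let s : Int := (PySem.List.pyRange 1 K 2).foldl
        (fun s K_a => s + ((counts.get? K_a).getD 0) * ((counts.get? (K - 1 - K_a)).getD 0)) 0
      counts.insert K s) counts
  counts.items

-- ===== PORT B =====
-- state st = (counts, cat, power, m) as in Source B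
def syntactic_counts_py_alt (max_k : Int) (binary : Bool) : List (Int × Int) :=
  let leaves : Int := if binary then 3 else 2
  let st := (PySem.List.pyRange 3 (max_k + 1) 2).foldl
    (fun (st : PySem.Dict Int Int × Int × Int × Int) K =>
      (st.1.insert K (PySem.Int.floordiv (st.2.1 * (2 * (2 * st.2.2.2 + 1))) (st.2.2.2 + 2)
                      * (st.2.2.1 * leaves)),
       PySem.Int.floordiv (st.2.1 * (2 * (2 * st.2.2.2 + 1))) (st.2.2.2 + 2),
       st.2.2.1 * leaves,
       st.2.2.2 + 1))
    (PySem.Dict.ofList [(1, leaves)], 1, leaves, 0)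
  st.1.items

-- ===== PRECONDITION & SPEC =====
def Spec_syntactic_counts_py (max_k : Int) (binary : Bool) (out : List (Int × Int)) : Prop := out = syntactic_counts_py_alt max_k binary
instance (max_k : Int) (binary : Bool) (out : List (Int × Int)) : Decidable (Spec_syntactic_counts_py max_k binary out) := by unfold Spec_syntactic_counts_py; infer_instance

-- ===== CLAIM (what is proved, stated in full; the proofs are below) =====
def Claim_equal_syntactic_counts_py : Prop := ∀ (max_k : Int) (binary : Bool), Dom_syntactic_counts_py max_k binary → Spec_syntactic_counts_py max_k binary (syntactic_counts_py max_k binary)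

-- ===== LEMMAS AND PROOFS =====

-- the common value of both dicts after n loop iterations
def pvModel (L : Int) (n : Nat) : List (Int × Int) :=
  (1, L) :: (List.range n).map (fun i : Nat => ((3 + 2 * (i : Int) : Int), ((catalan (i + 1) : Int)) * L ^ (i + 2)))

lemma pvModel_keys_nodup (L : Int) (n : Nat) : (PySem.Dict.mk (pvModel L n)).keys.Nodup := by
  simp only [PySem.Dict.keys_mk, pvModel, List.map_cons, List.map_map]
  refine List.nodup_cons.2 ⟨?_, ?_⟩
  · simp only [List.mem_map, List.mem_range, Function.comp]
    rintro ⟨i, -, h⟩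
    omega
  · exact List.nodup_range.map (fun a b h => by
      simp only [Function.comp] at h; omega)

lemma pvModel_get? (L : Int) (n i : Nat) (hi : i ≤ n) :
    (PySem.Dict.mk (pvModel L n)).get? (1 + 2 * (i : Int))
      = some ((catalan i : Int) * L ^ (i + 1)) := by
  apply PySem.Dict.get?_of_mem_items _ _ (pvModel_keys_nodup L n)
  show _ ∈ pvModel L n
  cases i with
  | zero => simp [pvModel, catalan_zero]
  | succ j =>
    apply List.mem_cons_of_mem
    refine List.mem_map.2 ⟨j, List.mem_range.2 (by omega), ?_⟩
    refine Prod.ext ?_ rfl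
    push_cast; ring

lemma pvModel_fresh (L : Int) (n : Nat) :
    (PySem.Dict.mk (pvModel L n)).contains (3 + 2 * (n : Int)) = false := by
  rw [PySem.Dict.contains_mk, List.any_eq_false]
  intro p hp
  simp only [pvModel, List.mem_cons, List.mem_map] at hp
  rcases hp with h | ⟨i, hi, rfl⟩
  · subst h
    simp only [beq_iff_eq]
    omega
  · simp only [List.mem_range] at hi
    simp only [beq_iff_eq]
    omega

lemma pv_list_sum_range (n : Nat) (f : Nat → Nat) :
    ((List.range n).map f).sum = ∑ i ∈ Finset.range n, f i := by
  induction n with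
  | zero => simp
  | succ n ih => rw [List.range_succ, Finset.sum_range_succ]; simp [ih]

lemma pv_cat_step (k : Nat) : 2 * (2 * k + 1) * catalan k = (k + 2) * catalan (k + 1) := by
  have h1 := succ_mul_catalan_eq_centralBinom k
  have h2 := succ_mul_catalan_eq_centralBinom (k + 1)
  have h3 := Nat.succ_mul_centralBinom_succ k
  have key : (k + 1) * (2 * (2 * k + 1) * catalan k) = (k + 1) * ((k + 2) * catalan (k + 1)) := by
    calc (k + 1) * (2 * (2 * k + 1) * catalan k)
        = 2 * (2 * k + 1) * ((k + 1) * catalan k) := by ring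
      _ = 2 * (2 * k + 1) * k.centralBinom := by rw [h1]
      _ = (k + 1) * (k + 1).centralBinom := h3.symm
      _ = (k + 1) * ((k + 1 + 1) * catalan (k + 1)) := by rw [h2]
      _ = (k + 1) * ((k + 2) * catalan (k + 1)) := by ring
  exact Nat.eq_of_mul_eq_mul_left (by omega) key

lemma pv_cat_step_int (k : Nat) :
    PySem.Int.floordiv ((catalan k : Int) * (2 * (2 * (k : Int) + 1))) ((k : Int) + 2)
      = (catalan (k + 1) : Int) := by
  have h := congrArg (fun x : Nat => (x : Int)) (pv_cat_step k)
  push_cast at h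
  have hnum : (catalan k : Int) * (2 * (2 * (k : Int) + 1)) = ((k : Int) + 2) * (catalan (k + 1) : Int) := by
    linarith
  rw [hnum]
  show (((k : Int) + 2) * (catalan (k + 1) : Int)).fdiv ((k : Int) + 2) = _
  exact Int.mul_fdiv_cancel_left _ (by omega)

-- catalan convolution, in List/Int form
lemma pv_conv (n : Nat) :
    ((List.range (n + 1)).map (fun i => ((catalan i * catalan (n - i) : Nat) : Int))).sum
      = (catalan (n + 1) : Int) := by
  have : ((List.range (n + 1)).map (fun i => catalan i * catalan (n - i))).sum = catalan (n + 1) := by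
    rw [pv_list_sum_range, ← Fin.sum_univ_eq_sum_range, ← catalan_succ]
  calc ((List.range (n + 1)).map (fun i => ((catalan i * catalan (n - i) : Nat) : Int))).sum
      = (((List.range (n + 1)).map (fun i => catalan i * catalan (n - i))).sum : Int) := by
        rw [Nat.cast_list_sum, List.map_map]; rfl
    _ = (catalan (n + 1) : Int) := by rw [this]

-- A's inner loop on the model dict computes the next model value
lemma pv_inner_sum (L : Int) (n : Nat) :
    (PySem.List.pyRange 1 (3 + 2 * (n : Int)) 2).foldl
      (fun s K_a => s + (((PySem.Dict.mk (pvModel L n)).get? K_a).getD 0)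
                      * (((PySem.Dict.mk (pvModel L n)).get? (3 + 2 * (n : Int) - 1 - K_a)).getD 0)) 0
      = (catalan (n + 1) : Int) * L ^ (n + 2) := by
  rw [PySem.List.pyRange_of_pos _ _ (by norm_num : (0:Int) < 2)]
  have hn : (if (1:Int) < 3 + 2 * (n : Int)
      then ((3 + 2 * (n : Int) - 1 + 2 - 1) / 2).toNat else 0) = n + 1 := by
    rw [if_pos (by omega)]; omega
  rw [hn, PySem.List.foldl_add, zero_add, List.map_map]
  have hmap : ((List.range (n + 1)).map
      ((fun K_a => (((PySem.Dict.mk (pvModel L n)).get? K_a).getD 0)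
                 * (((PySem.Dict.mk (pvModel L n)).get? (3 + 2 * (n : Int) - 1 - K_a)).getD 0))
        ∘ (fun k : Nat => (1 : Int) + 2 * k)))
      = (List.range (n + 1)).map (fun i => ((catalan i * catalan (n - i) : Nat) : Int) * L ^ (n + 2)) := by
    apply List.map_congr_left
    intro i hi
    have hi' : i ≤ n := by simpa [Nat.lt_succ_iff] using List.mem_range.1 hi
    have hkey : (3 + 2 * (n : Int) - 1 - (1 + 2 * (i : Int))) = 1 + 2 * ((n - i : Nat) : Int) := by
      omega
    simp only [Function.comp, hkey, pvModel_get? L n i hi', pvModel_get? L n (n - i) (by omega),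
      Option.getD_some]
    have he : (i + 1) + (n - i + 1) = n + 2 := by omega
    calc (catalan i : Int) * L ^ (i + 1) * ((catalan (n - i) : Int) * L ^ (n - i + 1))
        = ((catalan i : Int) * (catalan (n - i) : Int)) * L ^ ((i + 1) + (n - i + 1)) := by
          rw [pow_add]; ring
      _ = ((catalan i * catalan (n - i) : Nat) : Int) * L ^ (n + 2) := by rw [he]; push_cast; ring
  rw [hmap, List.sum_map_mul_right, pv_conv]

-- the whole of A's loop, over the first n keys
lemma pvA_fold (L : Int) (n : Nat) :
    ((List.range n).map (fun k : Nat => (3 : Int) + 2 * k)).foldl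
      (fun counts K => counts.insert K ((PySem.List.pyRange 1 K 2).foldl
        (fun s K_a => s + ((counts.get? K_a).getD 0) * ((counts.get? (K - 1 - K_a)).getD 0)) 0))
      (PySem.Dict.mk [(1, L)])
      = PySem.Dict.mk (pvModel L n) := by
  induction n with
  | zero => simp [pvModel]
  | succ n ih =>
    rw [List.range_succ, List.map_append, List.foldl_append, ih]
    simp only [List.map_cons, List.map_nil, List.foldl_cons, List.foldl_nil]
    apply PySem.Dict.ext
    rw [PySem.Dict.items_insert_of_not_contains _ _ (pvModel_fresh L n), pv_inner_sum L n]
    simp [pvModel, List.range_succ]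

-- the whole of B's loop, over the first n keys
lemma pvB_fold (L : Int) (n : Nat) :
    ((List.range n).map (fun k : Nat => (3 : Int) + 2 * k)).foldl
      (fun (st : PySem.Dict Int Int × Int × Int × Int) K =>
        (st.1.insert K (PySem.Int.floordiv (st.2.1 * (2 * (2 * st.2.2.2 + 1))) (st.2.2.2 + 2)
                        * (st.2.2.1 * L)),
         PySem.Int.floordiv (st.2.1 * (2 * (2 * st.2.2.2 + 1))) (st.2.2.2 + 2),
         st.2.2.1 * L,
         st.2.2.2 + 1))
      (PySem.Dict.mk [(1, L)], 1, L, 0)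
      = (PySem.Dict.mk (pvModel L n), (catalan n : Int), L ^ (n + 1), (n : Int)) := by
  induction n with
  | zero => simp [pvModel, catalan_zero]
  | succ n ih =>
    rw [List.range_succ, List.map_append, List.foldl_append, ih]
    simp only [List.map_cons, List.map_nil, List.foldl_cons, List.foldl_nil]
    have hcat : PySem.Int.floordiv ((catalan n : Int) * (2 * (2 * (n : Int) + 1))) ((n : Int) + 2)
        = (catalan (n + 1) : Int) := pv_cat_step_int n
    rw [hcat]
    refine Prod.ext ?_ (Prod.ext rfl (Prod.ext (pow_succ L (n + 1)).symm (by push_cast; ring)))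
    apply PySem.Dict.ext
    rw [PySem.Dict.items_insert_of_not_contains _ _ (pvModel_fresh L n)]
    rw [← pow_succ]
    simp [pvModel, List.range_succ]

lemma pv_ofList_single (L : Int) : PySem.Dict.ofList [((1 : Int), L)] = PySem.Dict.mk [(1, L)] := rfl

-- ===== VERDICT (by name: the statement is the Claim_ definition above) =====
theorem syntactic_counts_py_spec : Claim_equal_syntactic_counts_py := by
  intro max_k binary _
  show syntactic_counts_py max_k binary = syntactic_counts_py_alt max_k binary
  simp only [syntactic_counts_py, syntactic_counts_py_alt]
  rw [PySem.List.pyRange_of_pos _ _ (by norm_num : (0:Int) < 2), pv_ofList_single]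
  generalize (if (3:Int) < max_k + 1 then ((max_k + 1 - 3 + 2 - 1) / 2).toNat else 0) = n
  generalize (if binary = true then (3 : Int) else 2) = L
  rw [pvA_fold L n, pvB_fold L n]
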